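-- pv_equiv track=rewrite | github.com/karinamochetti/freeCodeCamp | 082 spookify.py | spookify
-- ===== SOURCE A (Python) =====
-- def spookify(boo):
--     i = 1
--     new_boo = ""
--     for c in boo.lower():
--         if c == "_" or c == "-":
--             new_boo += "~"
--         else:
--             i += 1
--             if i%2==1:
--                 new_boo += c
--             else:
--                 new_boo += c.upper()
--     return new_boo
-- ===== SOURCE B (Python) =====
-- def spookify(boo):
--     low = boo.lower()
--     letters = [c for c in low if c != "_" and c != "-"]
--     cased = [c.upper() if j % 2 == 0 else c for j, c in enumerate(letters)]
--     it = iter(cased)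
--     out = []
--     for c in low:
--         if c == "_" or c == "-":
--             out.append("~")
--         else:
--             out.append(next(it))
--     return "".join(out)
-- ===== Notes on version B (the rewrite author's own statement) =====
-- stated objective: alternative
-- what changed: Replaces A's single stateful loop (running parity counter deciding case inline) by a phase decomposition: filter the lowered string's non-separator letters, case them by their 0-based index in one comprehension, then a second pass reinserts '~' for separators and consumes the cased letters from an iterator.
import Mathlib
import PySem

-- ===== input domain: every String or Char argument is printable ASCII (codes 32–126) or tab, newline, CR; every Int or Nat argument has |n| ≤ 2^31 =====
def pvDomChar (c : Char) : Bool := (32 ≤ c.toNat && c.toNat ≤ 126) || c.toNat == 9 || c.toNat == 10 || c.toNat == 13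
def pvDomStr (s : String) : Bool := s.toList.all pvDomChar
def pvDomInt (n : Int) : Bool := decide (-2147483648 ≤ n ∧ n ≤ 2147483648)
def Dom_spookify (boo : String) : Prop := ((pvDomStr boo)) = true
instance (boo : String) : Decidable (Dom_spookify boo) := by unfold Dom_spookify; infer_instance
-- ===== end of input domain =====

-- B replaces A's single stateful loop (running parity counter) by a phase decomposition:
-- filter the lowered letters, case them by 0-based index, then reinsert around '~'s; same O(n) cost.


-- ===== PORT A =====
-- literal transliteration of A: one fold over boo.lower() carrying (i, new_boo)
def spookify (boo : String) : String :=
  ((PySem.Str.lower boo).toList.foldl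
    (fun (st : Int × String) (c : Char) =>
      if c == '_' || c == '-' then (st.1, st.2.push '~')
      else
        let i := st.1 + 1
        if PySem.Int.mod i 2 == 1 then (i, st.2.push c)
        else (i, st.2.push (PySem.Chars.upperChar c)))
    (1, "")).2

-- ===== PORT B =====
-- the 'for c in low: … next(it)' loop of Source B; the [] case for the iterator is unreachable
-- (cased has exactly one element per non-separator char of low)
def pvReinsert : List Char → List Char → List Char
  | [], _ => []
  | c :: t, cs =>
    if c == '_' || c == '-' then '~' :: pvReinsert t cs
    else
      match cs with
      | [] => []
      | d :: ds => d :: pvReinsert t ds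

def spookify_alt (boo : String) : String :=
  let low := (PySem.Str.lower boo).toList
  let letters := low.filter (fun c => !(c == '_' || c == '-'))
  let cased := (PySem.List.enumerate letters 0).map
    (fun p => if PySem.Int.mod p.1 2 == 0 then PySem.Chars.upperChar p.2 else p.2)
  String.ofList (pvReinsert low cased)

-- ===== PRECONDITION & SPEC =====
def Spec_spookify (boo : String) (out : String) : Prop := out = spookify_alt boo
instance (boo : String) (out : String) : Decidable (Spec_spookify boo out) := by unfold Spec_spookify; infer_instance

-- ===== CLAIM (what is proved, stated in full; the proofs are below) =====
def Claim_equal_spookify : Prop := ∀ (boo : String), Dom_spookify boo → Spec_spookify boo (spookify boo)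

-- ===== LEMMAS AND PROOFS =====

-- common specification: output chars when k non-separator letters were already consumed
def pvG : List Char → Nat → List Char
  | [], _ => []
  | c :: t, k =>
    if c == '_' || c == '-' then '~' :: pvG t k
    else (if k % 2 = 0 then PySem.Chars.upperChar c else c) :: pvG t (k + 1)

-- B's cased list, generated from index k
def pvCaseFrom : Nat → List Char → List Char
  | _, [] => []
  | k, c :: t => (if k % 2 = 0 then PySem.Chars.upperChar c else c) :: pvCaseFrom (k + 1) t

theorem pvA_foldl (l : List Char) : ∀ (k : Nat) (s : String),
    (l.foldl
      (fun (st : Int × String) (c : Char) =>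
        if c == '_' || c == '-' then (st.1, st.2.push '~')
        else
          let i := st.1 + 1
          if PySem.Int.mod i 2 == 1 then (i, st.2.push c)
          else (i, st.2.push (PySem.Chars.upperChar c)))
      ((k : Int) + 1, s)).2 = s ++ String.ofList (pvG l k) := by
  induction l with
  | nil => intro k s; simp [pvG]
  | cons c t ih =>
    intro k s
    by_cases hsep : (c == '_' || c == '-') = true
    · simp only [List.foldl_cons, hsep, if_true, pvG]
      rw [ih k]
      apply String.toList_inj.mp; simp
    · have hmod : PySem.Int.mod ((k : Int) + 1 + 1) 2 = (k : Int) % 2 := by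
        simp only [PySem.Int.mod, Int.fmod_eq_emod]; omega
      have hcast : (k : Int) + 1 + 1 = ((k + 1 : Nat) : Int) + 1 := by push_cast; ring
      by_cases hk : k % 2 = 0
      · have h1 : (PySem.Int.mod ((k : Int) + 1 + 1) 2 == 1) = false := by
          rw [hmod]; simp; omega
        simp only [List.foldl_cons, hsep, Bool.false_eq_true, if_false, h1]
        rw [hcast, ih (k + 1)]
        simp only [pvG, hsep, Bool.false_eq_true, if_false, if_pos hk]
        apply String.toList_inj.mp; simp
      · have h1 : (PySem.Int.mod ((k : Int) + 1 + 1) 2 == 1) = true := by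
          rw [hmod]; simp; omega
        simp only [List.foldl_cons, hsep, Bool.false_eq_true, if_false, h1, if_true]
        rw [hcast, ih (k + 1)]
        simp only [pvG, hsep, Bool.false_eq_true, if_false, if_neg hk]
        apply String.toList_inj.mp; simp

theorem pvEnum_map (letters : List Char) : ∀ (k : Nat),
    (PySem.List.enumerate letters (k : Int)).map
      (fun p => if PySem.Int.mod p.1 2 == 0 then PySem.Chars.upperChar p.2 else p.2)
    = pvCaseFrom k letters := by
  induction letters with
  | nil => intro k; simp [PySem.List.enumerate_nil, pvCaseFrom]
  | cons c t ih =>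
    intro k
    rw [PySem.List.enumerate_cons]
    have hmod : PySem.Int.mod (k : Int) 2 = (k : Int) % 2 := by
      simp [PySem.Int.mod, Int.fmod_eq_emod]
    have hcast : (k : Int) + 1 = ((k + 1 : Nat) : Int) := by push_cast; ring
    by_cases hk : k % 2 = 0
    · have h0 : (PySem.Int.mod (k : Int) 2 == 0) = true := by rw [hmod]; simp; omega
      simp only [List.map_cons, h0, if_true, pvCaseFrom, if_pos hk, hcast, ih]
    · have h0 : (PySem.Int.mod (k : Int) 2 == 0) = false := by rw [hmod]; simp; omega
      simp only [List.map_cons, h0, Bool.false_eq_true, if_false, pvCaseFrom, if_neg hk, hcast, ih]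

theorem pvReinsert_caseFrom (l : List Char) : ∀ (k : Nat),
    pvReinsert l (pvCaseFrom k (l.filter (fun c => !(c == '_' || c == '-')))) = pvG l k := by
  induction l with
  | nil => intro k; simp [pvReinsert, pvG]
  | cons c t ih =>
    intro k
    rw [List.filter_cons]
    by_cases hsep : (c == '_' || c == '-') = true
    · have hns : (!(c == '_' || c == '-')) = false := by simp [hsep]
      simp only [pvReinsert, pvG, hns, Bool.false_eq_true, if_false, if_pos hsep, ih]
    · have hns : (!(c == '_' || c == '-')) = true := by simp_all
      simp only [pvReinsert, pvG, hns, if_true, if_neg hsep, pvCaseFrom, ih]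

-- ===== VERDICT (by name: the statement is the Claim_ definition above) =====
theorem spookify_spec : Claim_equal_spookify := by
  intro boo _
  unfold Spec_spookify spookify spookify_alt
  have hA := pvA_foldl (PySem.Str.lower boo).toList 0 ""
  have hB := pvEnum_map ((PySem.Str.lower boo).toList.filter (fun c => !(c == '_' || c == '-'))) 0
  simp only [Nat.cast_zero, zero_add] at hA hB
  rw [hA]
  simp only [hB, pvReinsert_caseFrom]
  apply String.toList_inj.mp; simp
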